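-- pv_equiv track=rewrite | github.com/alykapasi/coding-practice | leetcode/python/914.py | hasGroupSizeX
-- ===== SOURCE A (Python) =====
-- from typing import List
--
-- def hasGroupSizeX(deck: List[int]) -> bool:
--     vals = list(set(deck))
--     check = deck.count(vals[0])
--     ans = True
--     for i in range(1, len(vals)):
--         if check != deck.count(vals[i]):
--             ans = False
--             break
--     return ans
-- ===== SOURCE B (Python) =====
-- def hasGroupSizeX(deck):
--     s = sorted(deck)
--     runs = []
--     i = 0
--     n = len(s)
--     while i < n:
--         j = i + 1
--         while j < n and s[j] == s[i]:
--             j += 1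
--         runs.append(j - i)
--         i = j
--     return runs.count(runs[0]) == len(runs)
-- ===== Notes on version B (the rewrite author's own statement) =====
-- stated objective: alternative
-- what changed: B sorts the deck and run-length-encodes it with a two-pointer scan (each run of equal adjacent values is one distinct value's frequency), then checks that every run length equals the first via count==len, instead of A's set-then-repeated-deck.count scans.
import Mathlib
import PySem

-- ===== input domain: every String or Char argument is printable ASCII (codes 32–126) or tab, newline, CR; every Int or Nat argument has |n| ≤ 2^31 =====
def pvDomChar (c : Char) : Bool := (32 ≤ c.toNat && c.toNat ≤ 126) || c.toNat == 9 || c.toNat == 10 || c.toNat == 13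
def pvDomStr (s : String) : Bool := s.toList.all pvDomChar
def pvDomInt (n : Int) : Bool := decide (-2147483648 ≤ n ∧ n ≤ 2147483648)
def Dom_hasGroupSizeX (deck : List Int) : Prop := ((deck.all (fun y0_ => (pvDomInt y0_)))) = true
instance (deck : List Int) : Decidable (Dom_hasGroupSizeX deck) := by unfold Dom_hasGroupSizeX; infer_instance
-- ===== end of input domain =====

-- B sorts the deck and run-length-encodes it with a two-pointer scan (each run of equal values
-- is one distinct value's frequency), then checks all run lengths equal the first.

-- ===== PORT A =====
-- the 'for i in range(1, len(vals)): if check != deck.count(vals[i]): ans = False; break'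
-- loop, as structural recursion over vals[1:] (same values, same early exit)
def pvALoop (deck : List Int) (check : Nat) : List Int → Bool
  | [] => true
  | v :: rest => if check ≠ PySem.List.count deck v then false else pvALoop deck check rest

-- A iterates list(set(deck)); its result is order-independent, modelled via PySem.Set.ofList
def hasGroupSizeX (deck : List Int) : Bool :=
  let vals : PySem.Set Int := PySem.Set.ofList deck
  let check := PySem.List.count deck ((PySem.List.pyGet? vals 0).getD 0)  -- vals[0]; getD unreachable under Pre_
  pvALoop deck check vals.tail

-- ===== PORT B =====
-- Source B's outer 'while i < n' loop consumes one run of equal values per iteration: ported as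
-- structural recursion on the remaining suffix; the inner 'while j < n and s[j] == s[i]' count
-- j - i is exactly 1 + the length of the equal prefix of the tail (takeWhile), and the suffix
-- s[j:] the loop continues on is the rest (dropWhile)
def pvRuns : List Int → List Int
  | [] => []
  | x :: t =>
      (1 + ((t.takeWhile (· == x)).length : Int)) :: pvRuns (t.dropWhile (· == x))
termination_by s => s.length
decreasing_by
  simpa using Nat.lt_succ_of_le (List.length_dropWhile_le _ _)

def hasGroupSizeX_alt (deck : List Int) : Bool :=
  let r := pvRuns (PySem.List.sorted deck (fun v => v) false)
  let r0 := (PySem.List.pyGet? r 0).getD 0  -- r[0]; getD unreachable under Pre_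
  PySem.List.count r r0 == r.length

-- ===== PRECONDITION & SPEC =====
-- A raises IndexError (vals[0]) on the empty deck, so Pre_ excludes exactly deck = []
def Pre_hasGroupSizeX (deck : List Int) : Prop := deck ≠ []
instance (deck : List Int) : Decidable (Pre_hasGroupSizeX deck) := by unfold Pre_hasGroupSizeX; infer_instance
def pvWitness_hasGroupSizeX : List Int := [1, 2, 1, 2]

def Spec_hasGroupSizeX (deck : List Int) (out : Bool) : Prop := out = hasGroupSizeX_alt deck
instance (deck : List Int) (out : Bool) : Decidable (Spec_hasGroupSizeX deck out) := by unfold Spec_hasGroupSizeX; infer_instance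

-- ===== CLAIM (what is proved, stated in full; the proofs are below) =====
def Claim_equal_hasGroupSizeX : Prop := ∀ (deck : List Int), Dom_hasGroupSizeX deck → Pre_hasGroupSizeX deck → Spec_hasGroupSizeX deck (hasGroupSizeX deck)

-- ===== LEMMAS AND PROOFS =====

-- 'all counts of members of deck are equal': the common characterisation of both programs
def pvAllEq (deck : List Int) : Prop := ∀ v ∈ deck, ∀ w ∈ deck, List.count v deck = List.count w deck

-- A's break-loop is an 'all counts equal check' over its list
theorem pvALoop_eq_all (deck : List Int) (check : Nat) (l : List Int) :
    pvALoop deck check l = l.all (fun v => PySem.List.count deck v == check) := by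
  induction l with
  | nil => rfl
  | cons v rest ih =>
      rw [pvALoop, ih]
      by_cases h : check = PySem.List.count deck v
      · rw [if_neg (by simp [h])]
        simp [h]
      · rw [if_pos h]
        rw [PySem.List.count_eq] at h
        simp [Ne.symm h]

-- in a sorted list x :: t, x does not occur past the equal prefix
theorem pv_not_mem_dropWhile (x : Int) (t : List Int) (h : List.Pairwise (· ≤ ·) (x :: t)) :
    x ∉ t.dropWhile (· == x) := by
  have hle : ∀ z ∈ t, x ≤ z := fun z hz => (List.pairwise_cons.mp h).1 z hz
  have hp : List.Pairwise (· ≤ ·) t := (List.pairwise_cons.mp h).2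
  clear h
  induction t with
  | nil => simp
  | cons y u ih =>
      rw [List.dropWhile_cons]
      by_cases hb : (y == x) = true
      · rw [if_pos hb]
        exact ih (fun z hz => hle z (List.mem_cons_of_mem _ hz)) (List.pairwise_cons.mp hp).2
      · rw [if_neg hb]
        have hy : y ≠ x := by simpa using hb
        intro hmem
        rcases List.mem_cons.mp hmem with h1 | h2
        · exact hy h1.symm
        · have hxy : x ≤ y := hle y List.mem_cons_self
          have hyx : y ≤ x := (List.pairwise_cons.mp hp).1 x h2
          exact hy (le_antisymm hyx hxy)

-- every element of the equal prefix equals x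
theorem pv_mem_takeWhile_eq (x z : Int) (t : List Int) (h : z ∈ t.takeWhile (· == x)) : z = x := by
  have := List.mem_takeWhile_imp h
  simpa using this

-- the head run length is the head's count
theorem pv_count_head (x : Int) (t : List Int) (h : List.Pairwise (· ≤ ·) (x :: t)) :
    List.count x (x :: t) = 1 + (t.takeWhile (· == x)).length := by
  have hsplit : t = t.takeWhile (· == x) ++ t.dropWhile (· == x) := (List.takeWhile_append_dropWhile).symm
  have h1 : List.count x (t.takeWhile (· == x)) = (t.takeWhile (· == x)).length :=
    List.count_eq_length.mpr (fun b hb => (pv_mem_takeWhile_eq x b t hb).symm)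
  have h2 : List.count x (t.dropWhile (· == x)) = 0 :=
    List.count_eq_zero.mpr (pv_not_mem_dropWhile x t h)
  conv_lhs => rw [hsplit]
  rw [List.count_cons, List.count_append, h1, h2]
  simp; omega

-- the count of any later element ignores the head run
theorem pv_count_rest (x z : Int) (t : List Int) (h : List.Pairwise (· ≤ ·) (x :: t))
    (hz : z ∈ t.dropWhile (· == x)) :
    List.count z (x :: t) = List.count z (t.dropWhile (· == x)) := by
  have hzx : z ≠ x := fun e => pv_not_mem_dropWhile x t h (e ▸ hz)
  have hsplit : t = t.takeWhile (· == x) ++ t.dropWhile (· == x) := (List.takeWhile_append_dropWhile).symm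
  have h1 : List.count z (t.takeWhile (· == x)) = 0 :=
    List.count_eq_zero.mpr (fun hm => hzx (pv_mem_takeWhile_eq x z t hm))
  conv_lhs => rw [hsplit]
  rw [List.count_cons, List.count_append, h1]
  simp [Ne.symm hzx]

theorem pv_pairwise_dropWhile (x : Int) (t : List Int) (h : List.Pairwise (· ≤ ·) (x :: t)) :
    List.Pairwise (· ≤ ·) (t.dropWhile (· == x)) :=
  ((List.pairwise_cons.mp h).2.sublist (List.dropWhile_sublist _))

theorem pv_cons_pairwise_dropWhile (x : Int) (t : List Int) :
    ∀ z, z ∈ t.dropWhile (· == x) → z ∈ t :=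
  fun _ hz => (List.dropWhile_sublist _).mem hz

-- every run length is the count of some member
theorem pvRuns_mem_count (s : List Int) (h : List.Pairwise (· ≤ ·) s) :
    ∀ k ∈ pvRuns s, ∃ x ∈ s, (List.count x s : Int) = k := by
  induction s using pvRuns.induct with
  | case1 => simp [pvRuns]
  | case2 x t ih =>
      intro k hk
      rw [pvRuns] at hk
      rcases List.mem_cons.mp hk with h1 | h2
      · exact ⟨x, List.mem_cons_self, by rw [pv_count_head x t h]; push_cast; omega⟩
      · obtain ⟨z, hz, hc⟩ := ih (pv_pairwise_dropWhile x t h) k h2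
        refine ⟨z, List.mem_cons_of_mem _ (pv_cons_pairwise_dropWhile x t z hz), ?_⟩
        rw [pv_count_rest x z t h hz]; exact hc

-- every member's count is a run length
theorem pv_count_mem_runs (s : List Int) (h : List.Pairwise (· ≤ ·) s) :
    ∀ x ∈ s, (List.count x s : Int) ∈ pvRuns s := by
  induction s using pvRuns.induct with
  | case1 => simp
  | case2 x t ih =>
      intro v hv
      rw [pvRuns]
      by_cases hvrest : v ∈ t.dropWhile (· == x)
      · refine List.mem_cons_of_mem _ ?_
        rw [pv_count_rest x v t h hvrest]
        exact ih (pv_pairwise_dropWhile x t h) v hvrest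
      · -- v is in the head run, so v = x
        have hvx : v = x := by
          rcases List.mem_cons.mp hv with h1 | h2
          · exact h1
          · have : t = t.takeWhile (· == x) ++ t.dropWhile (· == x) := (List.takeWhile_append_dropWhile).symm
            rw [this] at h2
            rcases List.mem_append.mp h2 with h3 | h4
            · exact pv_mem_takeWhile_eq x v t h3
            · exact absurd h4 hvrest
        subst hvx
        refine List.mem_cons.mpr (Or.inl ?_)
        rw [pv_count_head v t h]; push_cast; omega

-- A is true iff all member counts are equal
theorem pvA_iff (deck : List Int) (hne : deck ≠ []) :
    (hasGroupSizeX deck = true) ↔ pvAllEq deck := by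
  unfold hasGroupSizeX
  obtain ⟨v0, vt, hv⟩ := List.exists_cons_of_ne_nil
    (show PySem.Set.ofList deck ≠ [] by
      intro h0
      cases deck with
      | nil => exact hne rfl
      | cons a t =>
          have ha : a ∈ PySem.Set.ofList (a :: t) :=
            (PySem.Set.mem_ofList _ _).mpr List.mem_cons_self
          rw [h0] at ha
          simp at ha)
  simp only [hv, pvALoop_eq_all, List.all_eq_true, beq_iff_eq, PySem.List.count_eq,
    List.tail_cons]
  have hmem : ∀ y, y ∈ deck ↔ y ∈ (v0 :: vt) := by
    intro y
    rw [← hv]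
    exact (PySem.Set.mem_ofList deck y).symm
  constructor
  · intro hall v hvmem w hwmem
    have hv' := (hmem v).mp hvmem
    have hw' := (hmem w).mp hwmem
    have hc : ∀ u ∈ (v0 :: vt), List.count u deck = List.count v0 deck := by
      intro u hu
      rcases List.mem_cons.mp hu with h1 | h2
      · rw [h1]
      · simpa using hall u h2
    rw [hc v hv', hc w hw']
  · intro he v hvmem
    have hv0 : v0 ∈ deck := (hmem v0).mpr List.mem_cons_self
    have hvd : v ∈ deck := (hmem v).mpr (List.mem_cons_of_mem _ hvmem)
    simpa using he v hvd v0 hv0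

-- B is true iff all member counts are equal
theorem pvB_iff (deck : List Int) (hne : deck ≠ []) :
    (hasGroupSizeX_alt deck = true) ↔ pvAllEq deck := by
  unfold hasGroupSizeX_alt
  set s := PySem.List.sorted deck (fun v => v) false with hs
  have hperm : s.Perm deck := PySem.List.sorted_perm deck (fun v => v) false
  have hpair : List.Pairwise (· ≤ ·) s := by
    simpa using PySem.List.sorted_pairwise deck (fun v => v)
  have hsne : s ≠ [] := fun h0 => hne ((h0 ▸ hperm.symm).eq_nil)
  obtain ⟨s0, st, hcons⟩ := List.exists_cons_of_ne_nil hsne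
  have hhead : List.count s0 s = 1 + (st.takeWhile (· == s0)).length := by
    rw [hcons]; exact pv_count_head s0 st (hcons ▸ hpair)
  have hr : pvRuns s = ((List.count s0 s : Int)) :: pvRuns (st.dropWhile (· == s0)) := by
    rw [hcons, pvRuns, ← hcons, hhead]; push_cast; ring_nf
  have hget : (PySem.List.pyGet? (pvRuns s) 0).getD 0 = (List.count s0 s : Int) := by
    rw [hr]; simp [PySem.List.pyGet?, PySem.List.pyIdx?]
  simp only [PySem.List.count_eq, hget, beq_iff_eq]
  rw [List.count_eq_length]
  have hs0 : s0 ∈ s := hcons ▸ List.mem_cons_self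
  constructor
  · intro hall v hv w hw
    have key : ∀ u ∈ deck, List.count u deck = List.count s0 deck := by
      intro u hu
      have hus : u ∈ s := hperm.mem_iff.mpr hu
      have hin : (List.count u s : Int) ∈ pvRuns s := pv_count_mem_runs s hpair u hus
      have := hall _ hin
      have hnat : List.count u s = List.count s0 s := by exact_mod_cast this.symm
      rw [← hperm.count_eq u, ← hperm.count_eq s0, hnat]
    rw [key v hv, key w hw]
  · intro he k hk
    obtain ⟨x, hx, hcx⟩ := pvRuns_mem_count s hpair k hk
    have hxd : x ∈ deck := hperm.mem_iff.mp hx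
    have hsd : s0 ∈ deck := hperm.mem_iff.mp hs0
    have hnat : List.count x deck = List.count s0 deck := he x hxd s0 hsd
    have : List.count x s = List.count s0 s := by
      rw [hperm.count_eq x, hperm.count_eq s0]; exact hnat
    rw [← hcx, this]

-- ===== VERDICT (by name: the statement is the Claim_ definition above) =====
theorem hasGroupSizeX_spec : Claim_equal_hasGroupSizeX := by
  intro deck _ hpre
  unfold Spec_hasGroupSizeX
  rw [Bool.eq_iff_iff, pvA_iff deck hpre, pvB_iff deck hpre]
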